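-- pv_equiv track=rewrite | github.com/YOHANMAURIN/Project | Mastermind/Code.py | spelling_verifications
-- ===== SOURCE A (Python) =====
-- def spelling_verifications(input_list):
--     possible_color_english = ["red", "yellow", "blue", "orange", "green", "white"]
--     possible_color_english_abreviation = ["r","y","b","o","g","w"]
--     possible_color_french = ["rouge", "jaune", "bleu", "orange", "vert", "blanc"]
--     possible_color_french_abreviation = ["ro","ja","ble","or","ve","bla"]
--     error = True
--     size=len(input_list)
--     english = 0
--     english_abreviation = 0
--     french = 0
--     french_abreviation = 0
--     for i in range (0,size):
--         if input_list[i] in possible_color_english :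
--             error = False
--             english = english + 1
--         elif input_list[i] in possible_color_english_abreviation :
--             error = False
--             english_abreviation = english_abreviation + 1
--         elif input_list[i] in possible_color_french :
--             error = False
--             french = french + 1
--         elif input_list[i] in possible_color_french_abreviation :
--             error = False
--             french_abreviation = french_abreviation + 1
--         else :
--             return(True)
--     number_of_words=[english, english_abreviation, french, french_abreviation] #normally if it's the same language there is only 1 item in the list that is different from 0
--     number_of_words.remove(max(number_of_words))#We remove the only item from the list that is different from 0
--     if (max(number_of_words)!=0): #If there is something different from 0 that means that he switched language at one time
--         return(True)
--     return(error)
-- ===== SOURCE B (Python) =====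
-- def spelling_verifications(input_list):
--     category = {}
--     for idx, words in enumerate([
--         ["red", "yellow", "blue", "orange", "green", "white"],
--         ["r", "y", "b", "o", "g", "w"],
--         ["rouge", "jaune", "bleu", "orange", "vert", "blanc"],
--         ["ro", "ja", "ble", "or", "ve", "bla"],
--     ]):
--         for w in words:
--             category.setdefault(w, idx)
--     used = set()
--     for w in input_list:
--         if w not in category:
--             return True
--         used.add(category[w])
--     return len(used) != 1
-- ===== Notes on version B (the rewrite author's own statement) =====
-- stated objective: simpler
-- what changed: Replaces A's four per-language counters and the remove-max/second-max post-processing with a single word-to-category dict built once and a set of the distinct categories seen, returning True exactly when a word is unknown or the set size differs from one.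
import Mathlib
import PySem

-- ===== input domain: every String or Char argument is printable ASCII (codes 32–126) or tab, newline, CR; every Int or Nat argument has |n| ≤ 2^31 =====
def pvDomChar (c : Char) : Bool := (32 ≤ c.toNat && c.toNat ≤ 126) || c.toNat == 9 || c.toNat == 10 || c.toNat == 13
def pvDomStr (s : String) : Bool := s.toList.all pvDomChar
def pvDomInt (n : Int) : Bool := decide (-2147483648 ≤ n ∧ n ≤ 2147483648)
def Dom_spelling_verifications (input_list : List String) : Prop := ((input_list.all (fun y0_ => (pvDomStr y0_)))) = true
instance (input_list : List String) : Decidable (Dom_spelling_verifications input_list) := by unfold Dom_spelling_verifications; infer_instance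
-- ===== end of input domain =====

-- B replaces A's four counters + remove-max/second-max check with one word→category dict and a set of used categories (objective: simpler).


-- ===== PORT A =====
-- code after A's loop: build [english, english_abreviation, french, french_abreviation],
-- remove its (first) max, test the remaining max; getD covers the impossible none cases
-- (the 4-element list is nonempty and its max is a member, so max?/remove? always return some).
def spvPostLoop (e ea f fa : Int) (error : Bool) : Bool :=
  let number_of_words : List Int := [e, ea, f, fa]
  let m := (PySem.List.max? number_of_words (fun x => x)).getD 0
  let rest := (PySem.List.remove? number_of_words m).getD []
  if (PySem.List.max? rest (fun x => x)).getD 0 ≠ 0 then true else error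

-- A's for-loop over the words, carrying error and the four counters; `return True` on an unknown word
def spvLoop : List String → Bool → Int → Int → Int → Int → Bool
  | [], error, e, ea, f, fa => spvPostLoop e ea f fa error
  | w :: ws, error, e, ea, f, fa =>
    if w ∈ ["red", "yellow", "blue", "orange", "green", "white"] then
      spvLoop ws false (e + 1) ea f fa
    else if w ∈ ["r", "y", "b", "o", "g", "w"] then
      spvLoop ws false e (ea + 1) f fa
    else if w ∈ ["rouge", "jaune", "bleu", "orange", "vert", "blanc"] then
      spvLoop ws false e ea (f + 1) fa
    else if w ∈ ["ro", "ja", "ble", "or", "ve", "bla"] then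
      spvLoop ws false e ea f (fa + 1)
    else true

def spelling_verifications (input_list : List String) : Bool :=
  spvLoop input_list true 0 0 0 0

-- ===== PORT B =====
-- the dict built by B's nested setdefault loop (enumerate written as explicit (idx, words) pairs)
def spvCategory : PySem.Dict String Int :=
  ([((0 : Int), ["red", "yellow", "blue", "orange", "green", "white"]),
    (1, ["r", "y", "b", "o", "g", "w"]),
    (2, ["rouge", "jaune", "bleu", "orange", "vert", "blanc"]),
    (3, ["ro", "ja", "ble", "or", "ve", "bla"])]).foldl
    (fun d p => p.2.foldl (fun d w => d.setdefault w p.1) d) PySem.Dict.empty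

-- B's loop over the words: unknown word → True, else collect the category in the set
def spvAltLoop (used : PySem.Set Int) : List String → Bool
  | [] => decide (PySem.Set.len used ≠ 1)
  | w :: ws =>
    match PySem.Dict.get? spvCategory w with
    | none => true
    | some c => spvAltLoop (PySem.Set.add used c) ws

def spelling_verifications_alt (input_list : List String) : Bool :=
  spvAltLoop PySem.Set.empty input_list

-- ===== PRECONDITION & SPEC =====
def Spec_spelling_verifications (input_list : List String) (out : Bool) : Prop := out = spelling_verifications_alt input_list
instance (input_list : List String) (out : Bool) : Decidable (Spec_spelling_verifications input_list out) := by unfold Spec_spelling_verifications; infer_instance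

-- ===== CLAIM (what is proved, stated in full; the proofs are below) =====
def Claim_equal_spelling_verifications : Prop := ∀ (input_list : List String), Dom_spelling_verifications input_list → Spec_spelling_verifications input_list (spelling_verifications input_list)

-- ===== LEMMAS AND PROOFS =====

-- the dict B builds, as a literal ('orange' kept at its first (English) insertion)
set_option maxHeartbeats 2000000 in
lemma spvCategory_eq : spvCategory = PySem.Dict.mk
    [("red", 0), ("yellow", 0), ("blue", 0), ("orange", 0), ("green", 0), ("white", 0),
     ("r", 1), ("y", 1), ("b", 1), ("o", 1), ("g", 1), ("w", 1),
     ("rouge", 2), ("jaune", 2), ("bleu", 2), ("vert", 2), ("blanc", 2),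
     ("ro", 3), ("ja", 3), ("ble", 3), ("or", 3), ("ve", 3), ("bla", 3)] := by
  decide

-- the dict lookup agrees with A's elif chain over the four lists
set_option maxHeartbeats 1000000 in
lemma spvCategory_get? (w : String) :
    PySem.Dict.get? spvCategory w =
      (if w ∈ ["red", "yellow", "blue", "orange", "green", "white"] then some 0
       else if w ∈ ["r", "y", "b", "o", "g", "w"] then some 1
       else if w ∈ ["rouge", "jaune", "bleu", "orange", "vert", "blanc"] then some 2
       else if w ∈ ["ro", "ja", "ble", "or", "ve", "bla"] then some 3
       else none) := by
  rw [spvCategory_eq]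
  by_cases h0 : w = "red"
  · subst h0; decide
  by_cases h1 : w = "yellow"
  · subst h1; decide
  by_cases h2 : w = "blue"
  · subst h2; decide
  by_cases h3 : w = "orange"
  · subst h3; decide
  by_cases h4 : w = "green"
  · subst h4; decide
  by_cases h5 : w = "white"
  · subst h5; decide
  by_cases h6 : w = "r"
  · subst h6; decide
  by_cases h7 : w = "y"
  · subst h7; decide
  by_cases h8 : w = "b"
  · subst h8; decide
  by_cases h9 : w = "o"
  · subst h9; decide
  by_cases h10 : w = "g"
  · subst h10; decide
  by_cases h11 : w = "w"
  · subst h11; decide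
  by_cases h12 : w = "rouge"
  · subst h12; decide
  by_cases h13 : w = "jaune"
  · subst h13; decide
  by_cases h14 : w = "bleu"
  · subst h14; decide
  by_cases h15 : w = "vert"
  · subst h15; decide
  by_cases h16 : w = "blanc"
  · subst h16; decide
  by_cases h17 : w = "ro"
  · subst h17; decide
  by_cases h18 : w = "ja"
  · subst h18; decide
  by_cases h19 : w = "ble"
  · subst h19; decide
  by_cases h20 : w = "or"
  · subst h20; decide
  by_cases h21 : w = "ve"
  · subst h21; decide
  by_cases h22 : w = "bla"
  · subst h22; decide
  simp only [PySem.Dict.get?_mk_cons, beq_iff_eq]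
  simp [h0, Ne.symm h0, h1, Ne.symm h1, h2, Ne.symm h2, h3, Ne.symm h3, h4, Ne.symm h4, h5, Ne.symm h5, h6, Ne.symm h6, h7, Ne.symm h7, h8, Ne.symm h8, h9, Ne.symm h9, h10, Ne.symm h10, h11, Ne.symm h11, h12, Ne.symm h12, h13, Ne.symm h13, h14, Ne.symm h14, h15, Ne.symm h15, h16, Ne.symm h16, h17, Ne.symm h17, h18, Ne.symm h18, h19, Ne.symm h19, h20, Ne.symm h20, h21, Ne.symm h21, h22, Ne.symm h22]
  rfl

-- a Nodup list contained in {0,1,2,3} has the length of the matching filter of [0,1,2,3]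
lemma spv_used_length (used : List Int) (hn : used.Nodup)
    (hsub : ∀ y ∈ used, y = 0 ∨ y = 1 ∨ y = 2 ∨ y = 3) :
    used.length = (List.filter (fun y => decide (y ∈ used)) [0, 1, 2, 3]).length := by
  have hperm : used.Perm (List.filter (fun y => decide (y ∈ used)) [0, 1, 2, 3]) := by
    rw [List.perm_ext_iff_of_nodup hn (List.Nodup.filter _ (by decide))]
    intro y
    simp only [List.mem_filter, decide_eq_true_eq]
    constructor
    · intro hy; exact ⟨by simpa using hsub y hy, hy⟩
    · exact fun h => h.2
  exact hperm.length_eq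

-- PySem.List.remove? on a four-element list, as an if-chain
lemma spv_remove4 (a b c d v : Int) : PySem.List.remove? [a, b, c, d] v =
    if a = v then some [b, c, d] else if b = v then some [a, c, d]
    else if c = v then some [a, b, d] else if d = v then some [a, b, c] else none := by
  by_cases h1 : a = v
  · subst h1; simp [PySem.List.remove?_cons_self]
  · by_cases h2 : b = v
    · subst h2; simp [PySem.List.remove?_cons_of_ne _ h1, PySem.List.remove?_cons_self, h1]
    · by_cases h3 : c = v
      · subst h3
        simp [PySem.List.remove?_cons_of_ne _ h1, PySem.List.remove?_cons_of_ne _ h2,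
          PySem.List.remove?_cons_self, h1, h2]
      · by_cases h4 : d = v
        · subst h4
          simp [PySem.List.remove?_cons_of_ne _ h1, PySem.List.remove?_cons_of_ne _ h2,
            PySem.List.remove?_cons_of_ne _ h3, PySem.List.remove?_cons_self, h1, h2, h3]
        · simp only [h1, h2, h3, h4, if_false]
          rw [PySem.List.remove?_eq_none_iff]
          simp only [List.mem_cons, List.not_mem_nil, or_false, not_or]
          exact ⟨fun h => h1 h.symm, fun h => h2 h.symm, fun h => h3 h.symm, fun h => h4 h.symm⟩

-- A's after-loop computation tests whether the number of nonzero counters differs from one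
set_option maxRecDepth 8000 in
set_option maxHeartbeats 1000000 in
lemma spv_postLoop_eq (e ea f fa : Int) (he : 0 ≤ e) (hea : 0 ≤ ea) (hf : 0 ≤ f) (hfa : 0 ≤ fa) :
    spvPostLoop e ea f fa (decide (e = 0 ∧ ea = 0 ∧ f = 0 ∧ fa = 0)) =
      decide (((if e ≠ 0 then 1 else 0) + (if ea ≠ 0 then 1 else 0)
        + (if f ≠ 0 then 1 else 0) + (if fa ≠ 0 then 1 else 0) : Int) ≠ 1) := by
  have m4 : (PySem.List.max? [e, ea, f, fa] (fun x => x)).getD 0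
      = max (max (max e ea) f) fa := by rw [PySem.List.max?_id_cons]; rfl
  have m3 : ∀ a b c : Int, (PySem.List.max? [a, b, c] (fun x => x)).getD 0
      = max (max a b) c := fun a b c => by rw [PySem.List.max?_id_cons]; rfl
  simp only [spvPostLoop, m4, spv_remove4]
  split_ifs <;>
    simp only [Option.getD_some, m3, Bool.true_eq, decide_eq_true_eq, decide_eq_decide] at * <;>
    omega

-- main loop invariant: A's loop state (error + four counters) vs B's set of used categories
lemma spv_loop_eq (ws : List String) (used : PySem.Set Int) (e ea f fa : Int)
    (hn : used.Nodup)
    (h0 : 0 ∈ used ↔ e ≠ 0) (h1 : 1 ∈ used ↔ ea ≠ 0)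
    (h2 : 2 ∈ used ↔ f ≠ 0) (h3 : 3 ∈ used ↔ fa ≠ 0)
    (hsub : ∀ y ∈ used, y = 0 ∨ y = 1 ∨ y = 2 ∨ y = 3)
    (he : 0 ≤ e) (hea : 0 ≤ ea) (hf : 0 ≤ f) (hfa : 0 ≤ fa) :
    spvLoop ws (decide (e = 0 ∧ ea = 0 ∧ f = 0 ∧ fa = 0)) e ea f fa = spvAltLoop used ws := by
  induction ws generalizing used e ea f fa with
  | nil =>
    simp only [spvLoop, spvAltLoop]
    have hlen : (PySem.Set.len used : Int) = (if e ≠ 0 then 1 else 0)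
        + (if ea ≠ 0 then 1 else 0) + (if f ≠ 0 then 1 else 0) + (if fa ≠ 0 then 1 else 0) := by
      have hl := spv_used_length used hn hsub
      by_cases m0 : (0 : Int) ∈ used <;> by_cases m1 : (1 : Int) ∈ used <;>
        by_cases m2 : (2 : Int) ∈ used <;> by_cases m3 : (3 : Int) ∈ used <;>
        simp_all [PySem.Set.len, List.filter]
    simp only [hlen]
    exact spv_postLoop_eq e ea f fa he hea hf hfa
  | cons w ws ih =>
    simp only [spvLoop, spvAltLoop, spvCategory_get? w]
    by_cases hE : w ∈ ["red", "yellow", "blue", "orange", "green", "white"]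
    · simp only [hE, if_pos]
      have hb : (false : Bool) = decide ((e + 1) = 0 ∧ ea = 0 ∧ f = 0 ∧ fa = 0) := by
        simp; omega
      rw [hb]
      exact ih (PySem.Set.add used 0) (e + 1) ea f fa (PySem.Set.nodup_add _ _ hn)
        (by simp [PySem.Set.mem_add]; omega)
        (by simp [PySem.Set.mem_add, h1])
        (by simp [PySem.Set.mem_add, h2])
        (by simp [PySem.Set.mem_add, h3])
        (by intro y hy; rcases (PySem.Set.mem_add _ _ _).1 hy with h | h
            · exact hsub y h
            · omega)
        (by omega) hea hf hfa
    · simp only [hE, if_false]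
      by_cases hA : w ∈ ["r", "y", "b", "o", "g", "w"]
      · simp only [hA, if_pos]
        have hb : (false : Bool) = decide (e = 0 ∧ (ea + 1) = 0 ∧ f = 0 ∧ fa = 0) := by
          simp; omega
        rw [hb]
        exact ih (PySem.Set.add used 1) e (ea + 1) f fa (PySem.Set.nodup_add _ _ hn)
          (by simp [PySem.Set.mem_add, h0])
          (by simp [PySem.Set.mem_add]; omega)
          (by simp [PySem.Set.mem_add, h2])
          (by simp [PySem.Set.mem_add, h3])
          (by intro y hy; rcases (PySem.Set.mem_add _ _ _).1 hy with h | h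
              · exact hsub y h
              · omega)
          he (by omega) hf hfa
      · simp only [hA, if_false]
        by_cases hF : w ∈ ["rouge", "jaune", "bleu", "orange", "vert", "blanc"]
        · simp only [hF, if_pos]
          have hb : (false : Bool) = decide (e = 0 ∧ ea = 0 ∧ (f + 1) = 0 ∧ fa = 0) := by
            simp; omega
          rw [hb]
          exact ih (PySem.Set.add used 2) e ea (f + 1) fa (PySem.Set.nodup_add _ _ hn)
            (by simp [PySem.Set.mem_add, h0])
            (by simp [PySem.Set.mem_add, h1])
            (by simp [PySem.Set.mem_add]; omega)
            (by simp [PySem.Set.mem_add, h3])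
            (by intro y hy; rcases (PySem.Set.mem_add _ _ _).1 hy with h | h
                · exact hsub y h
                · omega)
            he hea (by omega) hfa
        · simp only [hF, if_false]
          by_cases hFA : w ∈ ["ro", "ja", "ble", "or", "ve", "bla"]
          · simp only [hFA, if_pos]
            have hb : (false : Bool) = decide (e = 0 ∧ ea = 0 ∧ f = 0 ∧ (fa + 1) = 0) := by
              simp; omega
            rw [hb]
            exact ih (PySem.Set.add used 3) e ea f (fa + 1) (PySem.Set.nodup_add _ _ hn)
              (by simp [PySem.Set.mem_add, h0])
              (by simp [PySem.Set.mem_add, h1])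
              (by simp [PySem.Set.mem_add, h2])
              (by simp [PySem.Set.mem_add]; omega)
              (by intro y hy; rcases (PySem.Set.mem_add _ _ _).1 hy with h | h
                  · exact hsub y h
                  · omega)
              he hea hf (by omega)
          · simp [hFA]

-- ===== VERDICT (by name: the statement is the Claim_ definition above) =====
theorem spelling_verifications_spec : Claim_equal_spelling_verifications := by
  intro input_list _
  unfold Spec_spelling_verifications spelling_verifications spelling_verifications_alt
  have h := spv_loop_eq input_list PySem.Set.empty 0 0 0 0 (by simp [PySem.Set.empty])
    (by simp [PySem.Set.empty]) (by simp [PySem.Set.empty]) (by simp [PySem.Set.empty])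
    (by simp [PySem.Set.empty]) (by simp [PySem.Set.empty]) (le_refl 0) (le_refl 0)
    (le_refl 0) (le_refl 0)
  simpa using h
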